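-- pv_equiv track=rewrite | github.com/TexasInstruments/simplelink-lowpower-f3-sdk | tools/hsm/sign_hsm_fw.py | pad_into_24_bit_format
-- ===== SOURCE A (Python) =====
-- def pad_into_24_bit_format(data_bytes: list) -> list:
--     n = 4
--     data_bytes_padded = []
--     for i in range(0, len(data_bytes), n - 1):
--         data_bytes_padded.extend(data_bytes[i : i + n - 1])
--         data_bytes_padded.append(0)
--     data_bytes_padded.pop()
--     data_bytes_padded.extend([0] * (n - len(data_bytes_padded) % n))
--
--     return data_bytes_padded
-- ===== SOURCE B (Python) =====
-- def pad_into_24_bit_format(data_bytes: list) -> list: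
--     # Closed-form: output position j holds data_bytes[3*(j//4) + j%4] when that
--     # exists and j is not a pad slot (j % 4 == 3), else 0.
--     n = len(data_bytes)
--     words = (n + 2) // 3
--     return [
--         data_bytes[3 * (j // 4) + j % 4]
--         if j % 4 != 3 and 3 * (j // 4) + j % 4 < n
--         else 0
--         for j in range(4 * words)
--     ]
-- ===== Notes on version B (the rewrite author's own statement) =====
-- stated objective: alternative
-- what changed: B replaces A's sequential chunk walk (extend slice, append 0, pop last, final mod-4 extend) with a closed-form index map: it computes the output length 4*ceil(n/3) up front and fills each output position j directly from data_bytes[3*(j//4)+j%4] or 0.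
-- outside the precondition, e.g. on pad_into_24_bit_format([]): A raises IndexError, B returns []
import Mathlib
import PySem

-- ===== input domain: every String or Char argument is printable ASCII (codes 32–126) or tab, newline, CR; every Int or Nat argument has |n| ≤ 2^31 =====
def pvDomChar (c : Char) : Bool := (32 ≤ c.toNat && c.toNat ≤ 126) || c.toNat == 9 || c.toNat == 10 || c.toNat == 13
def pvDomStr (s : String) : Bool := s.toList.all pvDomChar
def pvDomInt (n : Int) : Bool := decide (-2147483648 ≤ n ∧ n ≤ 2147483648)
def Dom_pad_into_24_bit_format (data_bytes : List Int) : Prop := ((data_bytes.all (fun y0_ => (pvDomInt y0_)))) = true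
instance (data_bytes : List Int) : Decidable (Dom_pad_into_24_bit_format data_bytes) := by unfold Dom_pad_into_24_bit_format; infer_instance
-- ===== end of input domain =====

-- B computes the output by a closed-form index map (position j gets data_bytes[3*(j//4)+j%4]
-- or 0) instead of A's chunk walk with append-zero/pop/final-extend; objective: alternative.
-- (B returns [] on empty input, which Pre_ excludes because A's pop() raises IndexError there.)

-- ===== PORT A =====
-- n = 4 is inlined: the loop step is n - 1 = 3, slices are data_bytes[i:i+3].
def pad_into_24_bit_format (data_bytes : List Int) : List Int :=
  let acc := (PySem.List.pyRange 0 data_bytes.length 3).foldl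
    (fun acc i => (acc ++ PySem.List.slice data_bytes (some i) (some (i + 3))) ++ [0]) []
  match PySem.List.pop? acc with
  | none => []  -- data_bytes_padded.pop() raises IndexError here (empty input); excluded by Pre_
  | some (_, popped) => popped ++ List.replicate (4 - popped.length % 4) 0

-- ===== PORT B =====
-- the guard makes every index in range, so pyGetD's default 0 is never returned
def pad_into_24_bit_format_alt (data_bytes : List Int) : List Int :=
  let n : Int := data_bytes.length
  let words := PySem.Int.floordiv (n + 2) 3
  (PySem.List.pyRange 0 (4 * words) 1).map (fun j =>
    if PySem.Int.mod j 4 ≠ 3 ∧ 3 * PySem.Int.floordiv j 4 + PySem.Int.mod j 4 < n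
    then PySem.List.pyGetD data_bytes (3 * PySem.Int.floordiv j 4 + PySem.Int.mod j 4) 0
    else 0)

-- ===== PRECONDITION & SPEC =====
-- Pre_ excludes exactly the empty list, on which A's final pop() raises IndexError.
def Pre_pad_into_24_bit_format (data_bytes : List Int) : Prop := data_bytes ≠ []
instance (data_bytes : List Int) : Decidable (Pre_pad_into_24_bit_format data_bytes) := by unfold Pre_pad_into_24_bit_format; infer_instance
def pvWitness_pad_into_24_bit_format : List Int := [1, 2, 3, 4]

def Spec_pad_into_24_bit_format (data_bytes : List Int) (out : List Int) : Prop := out = pad_into_24_bit_format_alt data_bytes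
instance (data_bytes : List Int) (out : List Int) : Decidable (Spec_pad_into_24_bit_format data_bytes out) := by unfold Spec_pad_into_24_bit_format; infer_instance

-- ===== CLAIM (what is proved, stated in full; the proofs are below) =====
def Claim_equal_pad_into_24_bit_format : Prop := ∀ (data_bytes : List Int), Dom_pad_into_24_bit_format data_bytes → Pre_pad_into_24_bit_format data_bytes → Spec_pad_into_24_bit_format data_bytes (pad_into_24_bit_format data_bytes)

-- ===== LEMMAS AND PROOFS =====

-- Chunk-recursive views of the two programs (proof helpers only).
def padA (ys : List Int) : List Int :=
  if ys = [] then [] else ys.take 3 ++ 0 :: padA (ys.drop 3)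
termination_by ys.length
decreasing_by cases ys with
  | nil => simp_all
  | cons a t => simp [List.length_drop]

def padB (ys : List Int) : List Int :=
  if ys = [] then []
  else ys.take 3 ++ (List.replicate (4 - (ys.take 3).length) 0 ++ padB (ys.drop 3))
termination_by ys.length
decreasing_by cases ys with
  | nil => simp_all
  | cons a t => simp [List.length_drop]

lemma pyRange3_nil (a b : Int) (h : b ≤ a) : PySem.List.pyRange a b 3 = [] := by
  rw [PySem.List.pyRange_of_pos a b (by norm_num)]
  rw [if_neg (by omega)]
  simp

lemma pyRange3_cons (a b : Int) (h : a < b) :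
    PySem.List.pyRange a b 3 = a :: PySem.List.pyRange (a + 3) b 3 := by
  rw [PySem.List.pyRange_of_pos a b (by norm_num),
      PySem.List.pyRange_of_pos (a + 3) b (by norm_num)]
  have hN : ((b - a + 3 - 1) / 3).toNat
      = (if a + 3 < b then ((b - (a + 3) + 3 - 1) / 3).toNat else 0) + 1 := by
    split_ifs with h3 <;> omega
  rw [if_pos h, hN, List.range_succ_eq_map]
  simp only [List.map_cons, List.map_map, Nat.cast_zero, mul_zero, add_zero]
  congr 1
  apply List.map_congr_left
  intro k _
  simp only [Function.comp_apply, Nat.succ_eq_add_one]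
  push_cast
  ring

lemma foldA_eq (xs : List Int) :
    ∀ (n a : Nat) (acc : List Int), xs.length - a ≤ n →
      (PySem.List.pyRange (a : Int) xs.length 3).foldl
        (fun acc i => (acc ++ PySem.List.slice xs (some i) (some (i + 3))) ++ [0]) acc
      = acc ++ padA (xs.drop a) := by
  intro n
  induction n with
  | zero =>
    intro a acc h
    have hle : xs.length ≤ a := by omega
    rw [pyRange3_nil _ _ (by exact_mod_cast hle)]
    rw [List.drop_eq_nil_of_le hle]
    simp [padA]
  | succ n ih =>
    intro a acc h
    by_cases hab : a < xs.length
    · rw [pyRange3_cons _ _ (by exact_mod_cast hab)]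
      simp only [List.foldl_cons]
      have hslice : PySem.List.slice xs (some (a : Int)) (some ((a : Int) + 3))
          = (xs.drop a).take 3 := by
        have := PySem.List.slice_natCast_add xs a 3
        simpa using this
      have hcast : ((a : Int) + 3) = ((a + 3 : Nat) : Int) := by push_cast; ring
      rw [hslice, hcast, ih (a + 3) _ (by omega)]
      have hne : xs.drop a ≠ [] := by
        intro hnil
        have := List.length_drop (l := xs) (i := a)
        rw [hnil] at this
        simp at this
        omega
      conv_rhs => rw [padA, if_neg hne]
      rw [List.drop_drop]
      simp
    · rw [pyRange3_nil _ _ (by exact_mod_cast (by omega : xs.length ≤ a))]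
      rw [List.drop_eq_nil_of_le (by omega)]
      simp [padA]

lemma padA_ne_nil (ys : List Int) (h : ys ≠ []) : padA ys ≠ [] := by
  rw [padA, if_neg h]
  cases ys with
  | nil => exact absurd rfl h
  | cons a t => simp

lemma pad_eq : ∀ (n : Nat) (ys : List Int), ys.length ≤ n → ys ≠ [] →
    (padA ys).dropLast ++ List.replicate (4 - (padA ys).dropLast.length % 4) 0 = padB ys := by
  intro n
  induction n with
  | zero =>
    intro ys hn hne
    cases ys with
    | nil => exact absurd rfl hne
    | cons a t => simp at hn
  | succ n ih =>
    intro ys hn hne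
    by_cases hlong : 3 < ys.length
    · have hdne : ys.drop 3 ≠ [] := by
        intro hnil
        have := List.length_drop (l := ys) (i := 3)
        rw [hnil] at this; simp at this; omega
      have hg := padA_ne_nil _ hdne
      have htlen : (ys.take 3).length = 3 := by
        rw [List.length_take]; omega
      conv_lhs => rw [padA, if_neg hne]
      rw [List.dropLast_append_of_ne_nil (by simp : (0 :: padA (ys.drop 3)) ≠ []),
          List.dropLast_cons_of_ne_nil hg]
      have hlen : (ys.take 3 ++ 0 :: (padA (ys.drop 3)).dropLast).length
          = 4 + (padA (ys.drop 3)).dropLast.length := by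
        simp [htlen]; omega
      rw [hlen]
      have hmod : (4 + (padA (ys.drop 3)).dropLast.length) % 4
          = (padA (ys.drop 3)).dropLast.length % 4 := by omega
      rw [hmod]
      have hrec := ih (ys.drop 3) (by rw [List.length_drop]; omega) hdne
      conv_rhs => rw [padB, if_neg hne]
      rw [htlen]
      simp only [List.append_assoc, List.cons_append]
      rw [hrec]
      norm_num
    · have hd3 : ys.drop 3 = [] := List.drop_eq_nil_of_le (by omega)
      have ht3 : ys.take 3 = ys := List.take_of_length_le (by omega)
      have hlp : 1 ≤ ys.length := by
        cases ys with
        | nil => exact absurd rfl hne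
        | cons a t => simp
      have hA0 : padA ([] : List Int) = [] := by rw [padA]; simp
      have hB0 : padB ([] : List Int) = [] := by rw [padB]; simp
      rw [padA, if_neg hne, padB, if_neg hne, hd3, ht3, hA0, hB0]
      rw [List.dropLast_concat]
      have : ys.length % 4 = ys.length := Nat.mod_eq_of_lt (by omega)
      rw [this]
      simp

lemma foldA_top (xs : List Int) :
    (PySem.List.pyRange 0 xs.length 3).foldl
      (fun acc i => (acc ++ PySem.List.slice xs (some i) (some (i + 3))) ++ [0]) []
    = padA xs := by
  have h := foldA_eq xs xs.length 0 [] (by omega)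
  simpa using h

-- B-side: the per-position function of the index map.
def altF (xs : List Int) (j : Int) : Int :=
  if PySem.Int.mod j 4 ≠ 3 ∧ 3 * PySem.Int.floordiv j 4 + PySem.Int.mod j 4 < (xs.length : Int)
  then PySem.List.pyGetD xs (3 * PySem.Int.floordiv j 4 + PySem.Int.mod j 4) 0
  else 0

lemma altF_shift (xs : List Int) (k : Int) (hk : 0 ≤ k) :
    altF xs (k + 4) = altF (xs.drop 3) k := by
  have h4 : (0 : Int) < 4 := by norm_num
  simp only [altF, PySem.Int.mod_eq_emod_of_pos h4, PySem.Int.floordiv_eq_ediv_of_pos h4]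
  have e1 : (k + 4) % 4 = k % 4 := by omega
  have e2 : (k + 4) / 4 = k / 4 + 1 := by omega
  rw [e1, e2]
  have e3 : 3 * (k / 4 + 1) + k % 4 = (3 * (k / 4) + k % 4) + 3 := by ring
  rw [e3]
  have hi0 : 0 ≤ 3 * (k / 4) + k % 4 := by omega
  have hcond : ((3 * (k / 4) + k % 4) + 3 < ((xs.length : Int)))
      ↔ (3 * (k / 4) + k % 4 < (((xs.drop 3).length : Int))) := by
    rw [List.length_drop]; omega
  have hget : PySem.List.pyGetD xs ((3 * (k / 4) + k % 4) + 3) 0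
      = PySem.List.pyGetD (xs.drop 3) (3 * (k / 4) + k % 4) 0 := by
    rw [PySem.List.pyGetD_of_nonneg _ _ (by omega), PySem.List.pyGetD_of_nonneg _ _ hi0]
    have ht : ((3 * (k / 4) + k % 4) + 3).toNat = 3 + (3 * (k / 4) + k % 4).toNat := by omega
    rw [ht]
    simp [List.getD, List.getElem?_drop]
  rw [hget]
  exact if_congr (and_congr_right fun _ => hcond) rfl rfl

lemma alt_eq_map_altF (ys : List Int) :
    pad_into_24_bit_format_alt ys
      = (PySem.List.pyRange 0 (4 * PySem.Int.floordiv ((ys.length : Int) + 2) 3) 1).map (altF ys) := rfl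

lemma first4 (ys : List Int) (hne : ys ≠ []) :
    (PySem.List.pyRange 0 4 1).map (altF ys)
      = ys.take 3 ++ List.replicate (4 - (ys.take 3).length) 0 := by
  have hr : PySem.List.pyRange 0 4 1 = [0, 1, 2, 3] := by decide
  rw [hr]
  match ys with
  | [a] =>
    simp [altF, PySem.List.pyGetD_ofNat']
  | [a, b] =>
    simp [altF, PySem.List.pyGetD_ofNat']
  | a :: b :: c :: t =>
    have hlen : ((a :: b :: c :: t).length : Int) = (t.length : Int) + 3 := by
      simp; ring
    simp [altF, hlen, PySem.List.pyGetD_ofNat']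
    omega

lemma altB_eq_padB : ∀ (n : Nat) (ys : List Int), ys.length ≤ n →
    pad_into_24_bit_format_alt ys = padB ys := by
  intro n
  induction n with
  | zero =>
    intro ys hn
    have hnil : ys = [] := List.eq_nil_of_length_eq_zero (by omega)
    subst hnil
    rw [padB]
    simp
    decide
  | succ n ih =>
    intro ys hn
    by_cases hne : ys = []
    · subst hne
      rw [padB]
      simp
      decide
    · have hL : 1 ≤ ys.length := by
        cases ys with
        | nil => exact absurd rfl hne
        | cons a t => simp
      set L := ys.length with hLdef
      have hw : PySem.Int.floordiv ((L : Int) + 2) 3 = (((L + 2) / 3 : Nat) : Int) := by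
        have : ((L : Int) + 2) = (((L + 2 : Nat)) : Int) := by push_cast; ring
        rw [this]
        exact_mod_cast PySem.Int.floordiv_natCast (L + 2) 3
      set w : Nat := (L + 2) / 3 with hwdef
      have hw1 : 1 ≤ w := by omega
      rw [alt_eq_map_altF, hw]
      have hsplit : PySem.List.pyRange 0 (4 * ((w : Nat) : Int)) 1
          = PySem.List.pyRange 0 4 1 ++ PySem.List.pyRange 4 (4 * ((w : Nat) : Int)) 1 := by
        apply PySem.List.pyRange_one_append 0 4 _ (by norm_num)
        have : (4 : Int) ≤ 4 * (w : Int) := by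
          have : (1 : Int) ≤ (w : Int) := by exact_mod_cast hw1
          linarith
        exact this
      rw [hsplit, List.map_append, first4 ys hne]
      -- second part equals alt of the tail
      have htail : (PySem.List.pyRange 4 (4 * ((w : Nat) : Int)) 1).map (altF ys)
          = pad_into_24_bit_format_alt (ys.drop 3) := by
        set w' : Nat := ((ys.drop 3).length + 2) / 3 with hw'def
        have hlen3 : (ys.drop 3).length = L - 3 := by simp [hLdef]
        have hww' : w - 1 = w' := by rw [hw'def, hlen3]; omega
        rw [alt_eq_map_altF]
        have hw2 : PySem.Int.floordiv (((ys.drop 3).length : Int) + 2) 3 = ((w' : Nat) : Int) := by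
          have : (((ys.drop 3).length : Int) + 2) = ((((ys.drop 3).length + 2 : Nat)) : Int) := by
            push_cast; ring
          rw [this]
          exact_mod_cast PySem.Int.floordiv_natCast ((ys.drop 3).length + 2) 3
        rw [hw2]
        rw [PySem.List.pyRange_one, PySem.List.pyRange_one]
        have ht1 : ((4 * ((w : Nat) : Int) - 4)).toNat = 4 * w' := by omega
        have ht2 : ((4 * ((w' : Nat) : Int) - 0)).toNat = 4 * w' := by omega
        rw [ht1, ht2, List.map_map, List.map_map]
        apply List.map_congr_left
        intro k _
        simp only [Function.comp_apply]
        have : (4 : Int) + (k : Int) = (k : Int) + 4 := by ring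
        rw [this, altF_shift ys (k : Int) (by positivity)]
        norm_num
      rw [htail, ih (ys.drop 3) (by simp; omega)]
      conv_rhs => rw [padB, if_neg hne]
      simp

-- ===== VERDICT (by name: the statement is the Claim_ definition above) =====
theorem pad_into_24_bit_format_spec : Claim_equal_pad_into_24_bit_format := by
  intro xs _ hpre
  unfold Spec_pad_into_24_bit_format
  show pad_into_24_bit_format xs = pad_into_24_bit_format_alt xs
  simp only [pad_into_24_bit_format]
  rw [foldA_top]
  have hne : padA xs ≠ [] := padA_ne_nil xs hpre
  have hsplit : padA xs = (padA xs).dropLast ++ [(padA xs).getLast hne] :=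
    (List.dropLast_append_getLast hne).symm
  rw [hsplit, PySem.List.pop?_last]
  rw [altB_eq_padB xs.length xs le_rfl]
  exact pad_eq xs.length xs le_rfl hpre
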